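-- pv_equiv track=rewrite | github.com/scadkin/firstcocoagent | tools/district_prospector.py | format_all_for_telegram
-- ===== SOURCE A (Python) =====
-- def format_all_for_telegram(districts: list[dict]) -> str:
--     """Format full queue grouped by status."""
--     if not districts:
--         return "Prospecting queue is empty."
--
--     by_status: dict[str, list] = {}
--     for d in districts:
--         status = d.get("Status", "unknown")
--         by_status.setdefault(status, []).append(d)
--
--     lines = ["*Prospecting Queue*\n"]
--
--     status_order = ["pending", "approved", "researching", "draft", "complete", "skipped"]
--     status_emoji = {
--         "pending": "⏳", "approved": "✅", "researching": "🔍",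
--         "draft": "📝", "complete": "📄", "skipped": "⏭",
--     }
--
--     for status in status_order:
--         group = by_status.get(status, [])
--         if not group:
--             continue
--         emoji = status_emoji.get(status, "•")
--         lines.append(f"{emoji} *{status.upper()}* ({len(group)})")
--         for d in group[:10]:  # cap at 10 per status to keep message manageable
--             strategy = d.get("Strategy", "cold")
--             tag = {"upward": "REF", "winback": "WINBACK", "cold_license_request": "LIC REQ"}.get(strategy, "COLD")
--             name = d.get("Account Name", d.get("District Name", "?"))
--             state = d.get("State", "")
--             extra = ""
--             if status == "complete" and d.get("Sequence Doc URL"):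
--                 extra = f" — [Doc]({d['Sequence Doc URL']})"
--             lines.append(f"  [{tag}] {name} ({state}){extra}")
--         if len(group) > 10:
--             lines.append(f"  _...and {len(group) - 10} more_")
--         lines.append("")
--
--     total = len(districts)
--     lines.append(f"Total: {total} districts in queue")
--     return "\n".join(lines)
-- ===== SOURCE B (Python) =====
-- def _entry_line(status, d):
--     strategy = d.get("Strategy", "cold")
--     if strategy == "upward":
--         tag = "REF"
--     elif strategy == "winback":
--         tag = "WINBACK"
--     elif strategy == "cold_license_request":
--         tag = "LIC REQ"
--     else:
--         tag = "COLD"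
--     name = d.get("Account Name", d.get("District Name", "?"))
--     state = d.get("State", "")
--     url = d.get("Sequence Doc URL", "") if status == "complete" else ""
--     extra = f" — [Doc]({url})" if url else ""
--     return f"  [{tag}] {name} ({state}){extra}"
--
--
-- def _section_lines(status, label, emoji, group):
--     shown = [_entry_line(status, d) for d in group[:10]]
--     more = [f"  _...and {len(group) - 10} more_"] if len(group) > 10 else []
--     return [f"{emoji} *{label}* ({len(group)})"] + shown + more + [""]
--
--
-- def format_all_for_telegram(districts: list[dict]) -> str:
--     """Format full queue grouped by status."""
--     if not districts:
--         return "Prospecting queue is empty."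
--     lines = ["*Prospecting Queue*\n"]
--     for status, label, emoji in [
--         ("pending", "PENDING", "⏳"), ("approved", "APPROVED", "✅"),
--         ("researching", "RESEARCHING", "🔍"), ("draft", "DRAFT", "📝"),
--         ("complete", "COMPLETE", "📄"), ("skipped", "SKIPPED", "⏭"),
--     ]:
--         group = [d for d in districts if d.get("Status", "unknown") == status]
--         if group:
--             lines += _section_lines(status, label, emoji, group)
--     lines.append(f"Total: {len(districts)} districts in queue")
--     return "\n".join(lines)
-- ===== Notes on version B (the rewrite author's own statement) =====
-- stated objective: alternative
-- what changed: B removes A's by_status pre-grouping dict and instead selects each status group by re-filtering the district list per status, rendering each block with small section/entry helpers and an if/elif tag chain instead of dict literals.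
import Mathlib
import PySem

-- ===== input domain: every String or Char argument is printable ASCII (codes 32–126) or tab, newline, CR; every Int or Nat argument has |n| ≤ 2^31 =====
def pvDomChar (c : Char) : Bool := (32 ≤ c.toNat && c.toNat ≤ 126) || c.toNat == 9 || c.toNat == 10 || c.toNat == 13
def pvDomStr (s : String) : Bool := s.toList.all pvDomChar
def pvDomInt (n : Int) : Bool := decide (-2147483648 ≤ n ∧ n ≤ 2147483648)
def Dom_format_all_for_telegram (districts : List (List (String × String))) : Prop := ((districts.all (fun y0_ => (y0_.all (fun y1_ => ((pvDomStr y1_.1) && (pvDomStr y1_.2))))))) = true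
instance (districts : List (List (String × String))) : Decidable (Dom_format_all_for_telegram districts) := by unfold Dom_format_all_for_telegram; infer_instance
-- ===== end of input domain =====

-- B drops A's by_status pre-grouping dict and instead re-scans the district list once per status
-- (a filter per status), rendering each status block with small helper functions (objective: alternative).

-- d.get(k, dflt) on a Python dict, modelled as first-match lookup in the association list (shared by both ports)
def pvDget (d : List (String × String)) (k dflt : String) : String :=
  match d.find? (fun p => p.1 == k) with
  | some p => p.2
  | none => dflt

-- ===== PORT A =====
-- the f-string appended by A's inner 'for d in group[:10]' loop
def pvEntryA (status : String) (d : List (String × String)) : String :=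
  let strategy := pvDget d "Strategy" "cold"
  let tag := (PySem.Dict.ofList [("upward","REF"),("winback","WINBACK"),("cold_license_request","LIC REQ")]).getD strategy "COLD"
  let name := pvDget d "Account Name" (pvDget d "District Name" "?")
  let state := pvDget d "State" ""
  -- 'status == "complete" and d.get("Sequence Doc URL")': the get (default None) is truthy iff the key maps to a non-empty string
  let extra := if status == "complete" && !(pvDget d "Sequence Doc URL" "" == "") then
      " — [Doc](" ++ pvDget d "Sequence Doc URL" "" ++ ")" else ""
  "  [" ++ tag ++ "] " ++ name ++ " (" ++ state ++ ")" ++ extra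

def pvEmojiDict : PySem.Dict String String :=
  PySem.Dict.ofList [("pending","⏳"),("approved","✅"),("researching","🔍"),("draft","📝"),("complete","📄"),("skipped","⏭")]

-- the body of A's 'for status in status_order' loop
def pvStepA (byStatus : PySem.Dict String (List (List (String × String)))) (lines : List String) (status : String) : List String :=
  let group := byStatus.getD status []
  if group = [] then lines else
  let emoji := pvEmojiDict.getD status "•"
  let lines := lines ++ [emoji ++ " *" ++ PySem.Str.upper status ++ "* (" ++ PySem.Int.toStr (group.length : Int) ++ ")"]
  let lines := (PySem.List.slice group none (some 10)).foldl (fun ls d => ls ++ [pvEntryA status d]) lines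
  let lines := if group.length > 10 then lines ++ ["  _...and " ++ PySem.Int.toStr ((group.length : Int) - 10) ++ " more_"] else lines
  lines ++ [""]

def format_all_for_telegram (districts : List (List (String × String))) : String :=
  if districts = [] then "Prospecting queue is empty." else
  let byStatus : PySem.Dict String (List (List (String × String))) :=
    districts.foldl (fun bs d => bs.modify (pvDget d "Status" "unknown") [] (fun g => g ++ [d])) PySem.Dict.empty
  let lines : List String := ["*Prospecting Queue*\n"]
  let statusOrder := ["pending","approved","researching","draft","complete","skipped"]
  let lines := statusOrder.foldl (pvStepA byStatus) lines
  let total := districts.length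
  let lines := lines ++ ["Total: " ++ PySem.Int.toStr (total : Int) ++ " districts in queue"]
  PySem.Str.join "\n" lines

-- ===== PORT B =====
def pvEntryB (status : String) (d : List (String × String)) : String :=
  let strategy := pvDget d "Strategy" "cold"
  let tag := if strategy == "upward" then "REF"
    else if strategy == "winback" then "WINBACK"
    else if strategy == "cold_license_request" then "LIC REQ"
    else "COLD"
  let name := pvDget d "Account Name" (pvDget d "District Name" "?")
  let state := pvDget d "State" ""
  let url := if status == "complete" then pvDget d "Sequence Doc URL" "" else ""
  let extra := if url == "" then "" else " — [Doc](" ++ url ++ ")"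
  "  [" ++ tag ++ "] " ++ name ++ " (" ++ state ++ ")" ++ extra

def pvSectionB (status label emoji : String) (group : List (List (String × String))) : List String :=
  let shown := (group.take 10).map (pvEntryB status)
  let more := if group.length > 10 then ["  _...and " ++ PySem.Int.toStr ((group.length : Int) - 10) ++ " more_"] else []
  ([emoji ++ " *" ++ label ++ "* (" ++ PySem.Int.toStr (group.length : Int) ++ ")"] ++ shown ++ more) ++ [""]

-- the body of B's 'for status, label, emoji in …' loop
def pvStepB (districts : List (List (String × String))) (lines : List String) (t : String × String × String) : List String :=
  let group := districts.filter (fun d => pvDget d "Status" "unknown" == t.1)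
  if group = [] then lines else lines ++ pvSectionB t.1 t.2.1 t.2.2 group

def format_all_for_telegram_alt (districts : List (List (String × String))) : String :=
  if districts = [] then "Prospecting queue is empty." else
  let lines := [("pending","PENDING","⏳"),("approved","APPROVED","✅"),("researching","RESEARCHING","🔍"),
                ("draft","DRAFT","📝"),("complete","COMPLETE","📄"),("skipped","SKIPPED","⏭")].foldl
    (pvStepB districts) ["*Prospecting Queue*\n"]
  PySem.Str.join "\n" (lines ++ ["Total: " ++ PySem.Int.toStr (districts.length : Int) ++ " districts in queue"])

-- ===== PRECONDITION & SPEC =====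
def Spec_format_all_for_telegram (districts : List (List (String × String))) (out : String) : Prop := out = format_all_for_telegram_alt districts
instance (districts : List (List (String × String))) (out : String) : Decidable (Spec_format_all_for_telegram districts out) := by unfold Spec_format_all_for_telegram; infer_instance

-- ===== CLAIM (what is proved, stated in full; the proofs are below) =====
def Claim_equal_format_all_for_telegram : Prop := ∀ (districts : List (List (String × String))), Dom_format_all_for_telegram districts → Spec_format_all_for_telegram districts (format_all_for_telegram districts)

-- ===== LEMMAS AND PROOFS =====

-- A's by_status.get(status, []) is exactly B's per-status filter of the list
lemma pv_group_eq (districts : List (List (String × String))) (status : String) :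
    (districts.foldl (fun bs d => bs.modify (pvDget d "Status" "unknown") [] (fun g => g ++ [d])) PySem.Dict.empty).getD status []
      = districts.filter (fun d => pvDget d "Status" "unknown" == status) := by
  have h : districts.foldl (fun bs d => bs.modify (pvDget d "Status" "unknown") [] (fun g => g ++ [d])) PySem.Dict.empty
      = (districts.map (fun d => (pvDget d "Status" "unknown", d))).foldl
          (fun bs p => bs.modify p.1 [] (fun g => g ++ [p.2])) PySem.Dict.empty := by
    rw [List.foldl_map]
  rw [h, PySem.Dict.getD_foldl_modify_append, List.filter_map, List.map_map]
  simp [Function.comp_def]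

-- the dict-literal tag lookup is the if/elif chain
lemma pv_tag (s : String) :
    (PySem.Dict.ofList [("upward","REF"),("winback","WINBACK"),("cold_license_request","LIC REQ")]).getD s "COLD"
      = (if s == "upward" then "REF" else if s == "winback" then "WINBACK"
         else if s == "cold_license_request" then "LIC REQ" else "COLD") := by
  rw [PySem.Dict.getD_eq_get?_getD,
    show (PySem.Dict.ofList [("upward","REF"),("winback","WINBACK"),("cold_license_request","LIC REQ")] : PySem.Dict String String)
      = PySem.Dict.mk [("upward","REF"),("winback","WINBACK"),("cold_license_request","LIC REQ")] from rfl,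
    PySem.Dict.get?_mk_cons, PySem.Dict.get?_mk_cons, PySem.Dict.get?_mk_cons]
  simp only [beq_iff_eq]
  by_cases h1 : s = "upward"
  · subst h1; rfl
  by_cases h2 : s = "winback"
  · subst h2; rfl
  by_cases h3 : s = "cold_license_request"
  · subst h3; rfl
  rw [if_neg (fun hc => h1 hc.symm), if_neg (fun hc => h2 hc.symm), if_neg (fun hc => h3 hc.symm),
    if_neg h1, if_neg h2, if_neg h3]
  rfl

-- A's truthiness test on d.get("Sequence Doc URL") is B's url computation
lemma pv_extra (status : String) (d : List (String × String)) :
    (if status == "complete" && !(pvDget d "Sequence Doc URL" "" == "") then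
        " — [Doc](" ++ pvDget d "Sequence Doc URL" "" ++ ")" else "")
      = (if (if status == "complete" then pvDget d "Sequence Doc URL" "" else "") == "" then ""
         else " — [Doc](" ++ (if status == "complete" then pvDget d "Sequence Doc URL" "" else "") ++ ")") := by
  by_cases hc : (status == "complete") = true <;>
  by_cases hu : (pvDget d "Sequence Doc URL" "" == "") = true <;>
    simp [hc, hu]

-- the two entry renderings agree
lemma pv_entry_eq (status : String) (d : List (String × String)) :
    pvEntryA status d = pvEntryB status d := by
  simp only [pvEntryA, pvEntryB]
  rw [pv_tag, pv_extra]

-- group[:10] is take 10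
lemma pv_slice10 (group : List (List (String × String))) :
    PySem.List.slice group none (some 10) = group.take 10 := by
  have h10 : (10 : Int) = ((10 : Nat) : Int) := by norm_num
  rw [h10, PySem.List.slice_to_natCast]

-- one status step of A's loop equals one step of B's loop
lemma pv_step (districts : List (List (String × String)))
    (byStatus : PySem.Dict String (List (List (String × String))))
    (hbs : ∀ st, byStatus.getD st [] = districts.filter (fun d => pvDget d "Status" "unknown" == st))
    (lines : List String) (t : String × String × String)
    (hlab : PySem.Str.upper t.1 = t.2.1) (hemoji : pvEmojiDict.getD t.1 "•" = t.2.2) :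
    pvStepA byStatus lines t.1 = pvStepB districts lines t := by
  unfold pvStepA pvStepB
  simp only [hbs]
  set group := districts.filter (fun d => pvDget d "Status" "unknown" == t.1) with hg
  by_cases h : group = []
  · simp [h]
  · simp only [if_neg h, pvSectionB, pv_slice10, hlab, hemoji,
      PySem.List.foldl_append_singleton_eq_map]
    rw [List.map_congr_left (fun d _ => pv_entry_eq t.1 d)]
    by_cases h10 : group.length > 10 <;> simp [h10, List.append_assoc]

-- A's fold over status_order equals B's fold over the (status, label, emoji) triples
lemma pv_fold (districts : List (List (String × String)))
    (byStatus : PySem.Dict String (List (List (String × String))))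
    (hbs : ∀ st, byStatus.getD st [] = districts.filter (fun d => pvDget d "Status" "unknown" == st))
    (sts : List (String × String × String)) (lines : List String)
    (h : ∀ t ∈ sts, PySem.Str.upper t.1 = t.2.1 ∧ pvEmojiDict.getD t.1 "•" = t.2.2) :
    (sts.map (fun t => t.1)).foldl (pvStepA byStatus) lines = sts.foldl (pvStepB districts) lines := by
  induction sts generalizing lines with
  | nil => rfl
  | cons t ts ih =>
    simp only [List.map_cons, List.foldl_cons]
    rw [pv_step districts byStatus hbs lines t (h t (by simp)).1 (h t (by simp)).2]
    exact ih _ (fun u hu => h u (by simp [hu]))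

-- ===== VERDICT (by name: the statement is the Claim_ definition above) =====
theorem format_all_for_telegram_spec : Claim_equal_format_all_for_telegram := by
  intro districts _
  unfold Spec_format_all_for_telegram format_all_for_telegram format_all_for_telegram_alt
  by_cases h : districts = []
  · simp [h]
  · simp only [if_neg h]
    have hfold := pv_fold districts
      (districts.foldl (fun bs d => bs.modify (pvDget d "Status" "unknown") [] (fun g => g ++ [d])) PySem.Dict.empty)
      (pv_group_eq districts)
      [("pending","PENDING","⏳"),("approved","APPROVED","✅"),("researching","RESEARCHING","🔍"),
       ("draft","DRAFT","📝"),("complete","COMPLETE","📄"),("skipped","SKIPPED","⏭")]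
      ["*Prospecting Queue*\n"]
      (by decide)
    rw [show (["pending","approved","researching","draft","complete","skipped"] : List String)
        = ([("pending","PENDING","⏳"),("approved","APPROVED","✅"),("researching","RESEARCHING","🔍"),
            ("draft","DRAFT","📝"),("complete","COMPLETE","📄"),("skipped","SKIPPED","⏭")].map (fun t => t.1)) from rfl,
      hfold]
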